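-- pv_equiv track=rewrite | github.com/georgerohan001/Modern-Methods-Group-2 | gradient.py | find_trunk_class_index
-- ===== SOURCE A (Python) =====
-- def find_trunk_class_index(class_names: list[str]) -> int:
--     # Exact match first
--     for i, name in enumerate(class_names):
--         if name.strip().lower() == "trunk":
--             return i
--
--     # Fallback: accept "trunks"
--     for i, name in enumerate(class_names):
--         if name.strip().lower() == "trunks":
--             return i
--
--     raise ValueError(
--         "Could not find class 'trunk' in obj.names.\n"
--         f"Classes found: {class_names}"
--     )
-- ===== SOURCE B (Python) =====
-- def find_trunk_class_index(class_names: list[str]) -> int: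
--     # One pass: 'trunk' returns immediately; first 'trunks' is remembered as fallback.
--     trunks_i = None
--     for i, name in enumerate(class_names):
--         n = name.strip().lower()
--         if n == "trunk":
--             return i
--         if n == "trunks" and trunks_i is None:
--             trunks_i = i
--     if trunks_i is not None:
--         return trunks_i
--     raise ValueError(
--         "Could not find class 'trunk' in obj.names.\n"
--         f"Classes found: {class_names}"
--     )
-- ===== Notes on version B (the rewrite author's own statement) =====
-- stated objective: simpler
-- what changed: Replaced A's two full scans (one for 'trunk', a second for 'trunks') by a single pass that returns on 'trunk' immediately and remembers the first 'trunks' index as a fallback.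
import Mathlib
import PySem

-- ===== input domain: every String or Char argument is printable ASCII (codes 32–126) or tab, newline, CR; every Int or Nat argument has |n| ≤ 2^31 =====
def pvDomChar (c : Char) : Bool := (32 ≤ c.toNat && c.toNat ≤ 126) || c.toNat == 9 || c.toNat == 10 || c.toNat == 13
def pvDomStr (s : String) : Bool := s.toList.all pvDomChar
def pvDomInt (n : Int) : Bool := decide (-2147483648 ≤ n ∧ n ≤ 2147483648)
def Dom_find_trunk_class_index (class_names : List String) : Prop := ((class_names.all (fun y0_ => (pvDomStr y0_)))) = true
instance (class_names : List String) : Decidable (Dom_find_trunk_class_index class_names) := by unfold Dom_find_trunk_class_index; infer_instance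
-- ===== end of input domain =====

-- B replaces A's two full scans with a single pass that remembers the first 'trunks'
-- index as a fallback; objective: simpler (one pass). Equality is about the return
-- value on Pre_ (where A returns; outside Pre_ both Pythons raise the same ValueError).

-- ===== PORT A =====
-- name.strip().lower()
def pvNorm (s : String) : String := PySem.Str.lower (PySem.Str.strip s)

-- first pass of A: first index whose normalized name is "trunk"
def pvScanTrunk : List String → Int → Option Int
  | [], _ => none
  | s :: rest, i => if pvNorm s = "trunk" then some i else pvScanTrunk rest (i + 1)

-- second pass of A: first index whose normalized name is "trunks"
def pvScanTrunks : List String → Int → Option Int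
  | [], _ => none
  | s :: rest, i => if pvNorm s = "trunks" then some i else pvScanTrunks rest (i + 1)

def find_trunk_class_index (class_names : List String) : Int :=
  match pvScanTrunk class_names 0 with
  | some i => i
  | none =>
    match pvScanTrunks class_names 0 with
    | some i => i
    | none => 0  -- unreachable under Pre_: Python raises ValueError here

-- ===== PORT B =====
-- single pass; acc holds the first 'trunks' index seen so far (Python's trunks_i)
def pvAltLoop : List String → Int → Option Int → Int
  | [], _, acc =>
    match acc with
    | some j => j
    | none => 0  -- unreachable under Pre_: Python raises ValueError here
  | s :: rest, i, acc =>
    let n := pvNorm s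
    if n = "trunk" then i
    else pvAltLoop rest (i + 1) (if n = "trunks" ∧ acc = none then some i else acc)

def find_trunk_class_index_alt (class_names : List String) : Int :=
  pvAltLoop class_names 0 none

-- ===== PRECONDITION & SPEC =====
-- Pre_ excludes exactly the inputs where both Pythons raise ValueError (no name
-- normalizing to 'trunk' or 'trunks').
def Pre_find_trunk_class_index (class_names : List String) : Prop :=
  (class_names.any (fun s => pvNorm s = "trunk" ∨ pvNorm s = "trunks")) = true
instance (class_names : List String) : Decidable (Pre_find_trunk_class_index class_names) := by
  unfold Pre_find_trunk_class_index; infer_instance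

def pvWitness_find_trunk_class_index : List String := ["tree", " Trunks ", "trunk"]

def Spec_find_trunk_class_index (class_names : List String) (out : Int) : Prop := out = find_trunk_class_index_alt class_names
instance (class_names : List String) (out : Int) : Decidable (Spec_find_trunk_class_index class_names out) := by unfold Spec_find_trunk_class_index; infer_instance

-- ===== CLAIM (what is proved, stated in full; the proofs are below) =====
def Claim_equal_find_trunk_class_index : Prop := ∀ (class_names : List String), Dom_find_trunk_class_index class_names → Pre_find_trunk_class_index class_names → Spec_find_trunk_class_index class_names (find_trunk_class_index class_names)

-- ===== LEMMAS AND PROOFS =====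

-- One-pass loop = A's two scans, with the remembered fallback acc beating the
-- second scan of the remaining suffix (acc's index is earlier).
theorem pvAltLoop_eq (l : List String) : ∀ (i : Int) (acc : Option Int),
    pvAltLoop l i acc =
      match pvScanTrunk l i with
      | some j => j
      | none =>
        match acc with
        | some j => j
        | none =>
          match pvScanTrunks l i with
          | some j => j
          | none => 0 := by
  induction l with
  | nil => intro i acc; cases acc <;> simp [pvAltLoop, pvScanTrunk, pvScanTrunks]
  | cons s rest ih =>
    intro i acc
    by_cases h1 : pvNorm s = "trunk"
    · simp [pvAltLoop, pvScanTrunk, h1]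
    · by_cases h2 : pvNorm s = "trunks"
      · cases acc <;>
          simp [pvAltLoop, pvScanTrunk, pvScanTrunks, h2, ih]
      · cases acc <;>
          simp [pvAltLoop, pvScanTrunk, pvScanTrunks, h1, h2, ih]

-- ===== VERDICT (by name: the statement is the Claim_ definition above) =====
theorem find_trunk_class_index_spec : Claim_equal_find_trunk_class_index := by
  intro class_names _ _
  unfold Spec_find_trunk_class_index find_trunk_class_index find_trunk_class_index_alt
  rw [pvAltLoop_eq]
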